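-- pv_equiv track=rewrite | github.com/RickFBAG/photoframe | server/device/driver.py | _normalise_palette
-- ===== SOURCE A (Python) =====
-- from typing import Iterable, Optional, Protocol, runtime_checkable
--
-- def _normalise_palette(raw_palette: Iterable[int]) -> set[tuple[int, int, int]]:
--     values = list(raw_palette)
--     colours: set[tuple[int, int, int]] = set()
--     for index in range(0, len(values), 3):
--         triplet = values[index : index + 3]
--         if len(triplet) < 3:
--             break
--         colours.add((int(triplet[0]), int(triplet[1]), int(triplet[2])))
--     return colours
-- ===== SOURCE B (Python) =====
-- def _normalise_palette(raw_palette):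
--     values = iter(raw_palette)
--     return {(int(r), int(g), int(b)) for r, g, b in zip(values, values, values)}
-- ===== Notes on version B (the rewrite author's own statement) =====
-- stated objective: idiomatic
-- what changed: Replaces the explicit index loop with slicing and break by the standard zip-over-one-iterator chunking idiom and a set comprehension; the leftover 1-2 values are dropped implicitly by zip instead of an explicit length test.
import Mathlib
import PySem

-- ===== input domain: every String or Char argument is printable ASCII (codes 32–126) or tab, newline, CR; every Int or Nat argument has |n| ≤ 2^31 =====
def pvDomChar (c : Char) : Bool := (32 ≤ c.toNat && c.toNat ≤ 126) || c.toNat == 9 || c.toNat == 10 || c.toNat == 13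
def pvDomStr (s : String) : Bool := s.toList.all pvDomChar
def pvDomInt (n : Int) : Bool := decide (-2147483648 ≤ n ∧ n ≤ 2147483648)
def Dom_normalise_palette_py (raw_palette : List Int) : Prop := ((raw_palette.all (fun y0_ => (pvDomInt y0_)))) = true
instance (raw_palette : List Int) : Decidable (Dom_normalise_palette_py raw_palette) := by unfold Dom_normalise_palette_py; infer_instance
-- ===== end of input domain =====

-- B replaces A's explicit index loop (slice + break) with the zip-over-one-iterator
-- chunking idiom and a set comprehension (objective: idiomatic).

-- ===== PORT A =====
-- the 'for index in range(0, len(values), 3)' loop; 'break' = return colours.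
-- 'triplet[k]' is ported as pyGetD with default 0: exact here because the guard
-- ensures triplet.length = 3, so indices 0,1,2 are in range and Python cannot raise.
def npA_loop (values : List Int) : List Int → PySem.Set (Int × Int × Int) → PySem.Set (Int × Int × Int)
  | [], colours => colours
  | index :: rest, colours =>
    let triplet := PySem.List.slice values (some index) (some (index + 3))
    if triplet.length < 3 then colours
    else npA_loop values rest (PySem.Set.add colours
      (PySem.List.pyGetD triplet 0 0, PySem.List.pyGetD triplet 1 0, PySem.List.pyGetD triplet 2 0))

def normalise_palette_py (raw_palette : List Int) : List (Int × Int × Int) :=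
  npA_loop raw_palette (PySem.List.pyRange 0 (raw_palette.length : Int) 3) PySem.Set.empty

-- ===== PORT B =====
-- zip(it, it, it) over one iterator = consume the stream three at a time,
-- dropping the 1-2 leftover values; the set comprehension is PySem.Set.ofList.
def npB_chunks : List Int → List (Int × Int × Int)
  | r :: g :: b :: rest => (r, g, b) :: npB_chunks rest
  | _ => []

def normalise_palette_py_alt (raw_palette : List Int) : List (Int × Int × Int) :=
  PySem.Set.ofList (npB_chunks raw_palette)

-- ===== PRECONDITION & SPEC =====
def Spec_normalise_palette_py (raw_palette : List Int) (out : List (Int × Int × Int)) : Prop := out = normalise_palette_py_alt raw_palette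
instance (raw_palette : List Int) (out : List (Int × Int × Int)) : Decidable (Spec_normalise_palette_py raw_palette out) := by unfold Spec_normalise_palette_py; infer_instance

-- ===== CLAIM (what is proved, stated in full; the proofs are below) =====
def Claim_equal_normalise_palette_py : Prop := ∀ (raw_palette : List Int), Dom_normalise_palette_py raw_palette → Spec_normalise_palette_py raw_palette (normalise_palette_py raw_palette)

-- ===== LEMMAS AND PROOFS =====

-- range with step 3: cons form (not in the prelude, which only has the map form)
lemma pyRange3_cons (a b : Int) (h : a < b) :
    PySem.List.pyRange a b 3 = a :: PySem.List.pyRange (a + 3) b 3 := by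
  rw [PySem.List.pyRange_of_pos a b (by norm_num),
      PySem.List.pyRange_of_pos (a + 3) b (by norm_num)]
  have hn : (if a < b then ((b - a + 3 - 1) / 3).toNat else 0)
      = (if a + 3 < b then ((b - (a + 3) + 3 - 1) / 3).toNat else 0) + 1 := by
    by_cases h3 : a + 3 < b
    · simp only [if_pos h, if_pos h3]
      omega
    · simp only [if_pos h, if_neg h3]
      omega
  rw [hn, List.range_succ_eq_map, List.map_cons]
  simp only [Nat.cast_zero, mul_zero, add_zero, List.map_map]
  refine congrArg _ (List.map_congr_left fun k _ => ?_)
  simp [Function.comp]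
  ring

lemma pyRange3_nil (a b : Int) (h : b ≤ a) : PySem.List.pyRange a b 3 = [] := by
  rw [PySem.List.pyRange_of_pos a b (by norm_num)]
  simp [not_lt.mpr h]

-- main invariant: the loop from index i onward folds exactly B's chunks of values.drop i
lemma loop_eq (values : List Int) (i : Nat) (s : PySem.Set (Int × Int × Int)) :
    npA_loop values (PySem.List.pyRange (i : Int) (values.length : Int) 3) s
      = (npB_chunks (values.drop i)).foldl PySem.Set.add s := by
  by_cases hlt : i < values.length
  · rw [pyRange3_cons _ _ (by exact_mod_cast hlt)]
    have hslice : PySem.List.slice values (some (i : Int)) (some ((i : Int) + 3))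
        = (values.drop i).take 3 := by
      have := PySem.List.slice_toNat values (a := (i : Int)) (b := (i : Int) + 3)
        (by positivity) (by positivity)
      rw [this]
      congr 1
      omega
    rcases hd : values.drop i with _ | ⟨r, tl⟩
    · simp at hd; omega
    rcases tl with _ | ⟨g, tl2⟩
    · -- one leftover value: slice length 1 < 3, break; chunks = []
      have htrip : (values.drop i).take 3 = [r] := by rw [hd]; rfl
      simp only [npA_loop, hslice, htrip]
      rw [if_pos (by simp)]
      rfl
    rcases tl2 with _ | ⟨b, rest⟩
    · -- two leftover values: slice length 2 < 3, break; chunks = []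
      have htrip : (values.drop i).take 3 = [r, g] := by rw [hd]; rfl
      simp only [npA_loop, hslice, htrip]
      rw [if_pos (by simp)]
      rfl
    · -- full triplet
      have hrest : values.drop (i + 3) = rest := by
        have : values.drop (i + 3) = (values.drop i).drop 3 := by
          rw [List.drop_drop]
        rw [this, hd]; rfl
      have ih := loop_eq values (i + 3) (PySem.Set.add s (r, g, b))
      have htrip : (values.drop i).take 3 = [r, g, b] := by rw [hd]; rfl
      simp only [npA_loop, hslice, htrip]
      rw [if_neg (by simp)]
      have h0 : PySem.List.pyGetD ([r, g, b] : List Int) 0 0 = r := rfl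
      have h1 : PySem.List.pyGetD ([r, g, b] : List Int) 1 0 = g := rfl
      have h2 : PySem.List.pyGetD ([r, g, b] : List Int) 2 0 = b := rfl
      have hcast : ((i : Int) + 3) = ((i + 3 : Nat) : Int) := by push_cast; ring
      rw [h0, h1, h2, hcast, ih, hrest]
      rfl
  · rw [pyRange3_nil _ _ (by exact_mod_cast Nat.le_of_not_lt hlt)]
    rw [List.drop_eq_nil_of_le (Nat.le_of_not_lt hlt)]
    simp [npA_loop, npB_chunks]
termination_by values.length - i

-- ===== VERDICT (by name: the statement is the Claim_ definition above) =====
theorem normalise_palette_py_spec : Claim_equal_normalise_palette_py := by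
  intro raw_palette _
  unfold Spec_normalise_palette_py normalise_palette_py normalise_palette_py_alt
  have h0 : (0 : Int) = ((0 : Nat) : Int) := rfl
  rw [h0, loop_eq raw_palette 0 PySem.Set.empty, List.drop_zero,
      PySem.Set.ofList_eq_foldl]
  rfl
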